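-- pv_equiv track=rewrite | github.com/liuliuliuzy/leetcode-czy | 5608_minimum-initial-energy-to-finish-tasks.py | minimumEffortII
-- ===== SOURCE A (Python) =====
-- from typing import List
--
-- def minimumEffortII(tasks: List[List[int]]) -> int:
--     tasks.sort(key=lambda x: x[1] - x[0])
--     res = 0
--     while tasks:
--         for i in range(len(tasks)):
--             if res + tasks[i][0] >= tasks[i][1]:
--                 res = res + tasks[i][0]
--                 del tasks[i]
--                 break
--             else:
--                 if i == len(tasks) - 1:
--                     res = tasks[0][1]
--                     del tasks[0]
--
--     return res
-- ===== SOURCE B (Python) =====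
-- def minimumEffortII(tasks):
--     # Simpler: single forward pass over the tasks sorted ascending by (minimum - actual):
--     # req = max(minimum, actual + req). Does not mutate the caller's list
--     # (A sorts it in place and empties it; return value is identical).
--     req = 0
--     for t in sorted(tasks, key=lambda x: x[1] - x[0]):
--         req = max(t[1], t[0] + req)
--     return req
-- ===== Notes on version B (the rewrite author's own statement) =====
-- stated objective: simpler
-- what changed: Replaced the destructive while-loop with inner scans and deletions by a single foldl over the same sorted order (req = max(minimum, actual + req)); worst-case O(n^2) scanning disappears (measured similar on random inputs) and the input list is no longer mutated.
import Mathlib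
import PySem

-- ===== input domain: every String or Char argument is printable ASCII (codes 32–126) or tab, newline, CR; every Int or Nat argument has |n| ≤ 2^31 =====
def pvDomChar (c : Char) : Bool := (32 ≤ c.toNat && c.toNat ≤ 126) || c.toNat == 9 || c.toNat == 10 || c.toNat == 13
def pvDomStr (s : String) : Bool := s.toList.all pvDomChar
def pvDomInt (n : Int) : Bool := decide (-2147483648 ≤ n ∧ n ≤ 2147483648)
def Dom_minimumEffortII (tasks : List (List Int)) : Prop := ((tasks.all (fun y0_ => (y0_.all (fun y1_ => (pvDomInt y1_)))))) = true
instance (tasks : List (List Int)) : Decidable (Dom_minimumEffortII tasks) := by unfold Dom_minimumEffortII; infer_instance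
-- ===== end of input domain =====

-- B replaces A's destructive scan-and-delete while-loop by a single foldl over the same sorted
-- order (and, unlike A, B does not mutate the caller's list — Python A sorts it in place and
-- empties it; the equivalence proved here is about the RETURN value only).

-- ===== PORT A =====
-- one 'for i in range(len(tasks))' pass of A's while-loop: returns the (tasks, res) state at the
-- moment the pass ends (each pass deletes exactly one element; tasks[i][j] is ported with pyGetD,
-- exact under Pre_: every task has at least 2 entries)
def pvForA (ts : List (List Int)) (res : Int) (i : Nat) : List (List Int) × Int :=
  if _h : i < ts.length then
    let t := PySem.List.pyGetD ts (i : Int) []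
    if PySem.List.pyGetD t 1 0 ≤ res + PySem.List.pyGetD t 0 0 then
      (ts.eraseIdx i, res + PySem.List.pyGetD t 0 0)               -- res += tasks[i][0]; del tasks[i]; break
    else if i = ts.length - 1 then
      (ts.eraseIdx 0, PySem.List.pyGetD (PySem.List.pyGetD ts 0 []) 1 0)  -- res = tasks[0][1]; del tasks[0]
    else pvForA ts res (i + 1)
  else (ts, res)
termination_by ts.length - i

-- 'while tasks:' — each pass removes exactly one task, so tasks.length passes empty the list
def pvLoopA : Nat → List (List Int) → Int → Int
  | 0, _, res => res
  | fuel + 1, ts, res =>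
    if ts.isEmpty then res
    else
      let p := pvForA ts res 0
      pvLoopA fuel p.1 p.2

def minimumEffortII (tasks : List (List Int)) : Int :=
  let ts := PySem.List.sorted tasks (fun x => PySem.List.pyGetD x 1 0 - PySem.List.pyGetD x 0 0) false
  pvLoopA ts.length ts 0

-- ===== PORT B =====
def minimumEffortII_alt (tasks : List (List Int)) : Int :=
  (PySem.List.sorted tasks (fun x => PySem.List.pyGetD x 1 0 - PySem.List.pyGetD x 0 0) false).foldl
    (fun req t => max (PySem.List.pyGetD t 1 0) (PySem.List.pyGetD t 0 0 + req)) 0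

-- ===== PRECONDITION & SPEC =====
-- Pre_ excludes exactly the inputs on which Python A raises IndexError (in the sort key and the
-- element accesses): some task with fewer than 2 entries.
def Pre_minimumEffortII (tasks : List (List Int)) : Prop :=
  ∀ t ∈ tasks, 2 ≤ t.length
instance (tasks : List (List Int)) : Decidable (Pre_minimumEffortII tasks) := by
  unfold Pre_minimumEffortII; infer_instance

def pvWitness_minimumEffortII : List (List Int) := [[1, 3], [2, 4], [10, 11]]

def Spec_minimumEffortII (tasks : List (List Int)) (out : Int) : Prop := out = minimumEffortII_alt tasks
instance (tasks : List (List Int)) (out : Int) : Decidable (Spec_minimumEffortII tasks out) := by unfold Spec_minimumEffortII; infer_instance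

-- ===== CLAIM (what is proved, stated in full; the proofs are below) =====
def Claim_equal_minimumEffortII : Prop := ∀ (tasks : List (List Int)), Dom_minimumEffortII tasks → Pre_minimumEffortII tasks → Spec_minimumEffortII tasks (minimumEffortII tasks)

-- ===== LEMMAS AND PROOFS =====

-- the sort key lambda x: x[1] - x[0], named for the proofs
def pvKeyA (x : List Int) : Int := PySem.List.pyGetD x 1 0 - PySem.List.pyGetD x 0 0

-- When no index matches (res + a_j < m_j for every remaining j), A's inner scan runs to the last
-- index and there performs 'res = tasks[0][1]; del tasks[0]'.
theorem pvForA_nomatch (k : Nat) : ∀ (ts : List (List Int)) (res : Int) (i : Nat),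
    ts.length - i = k → i < ts.length →
    (∀ j, i ≤ j → j < ts.length →
      res + PySem.List.pyGetD (ts.getD j []) 0 0 < PySem.List.pyGetD (ts.getD j []) 1 0) →
    pvForA ts res i = (ts.eraseIdx 0, PySem.List.pyGetD (ts.getD 0 []) 1 0) := by
  induction k with
  | zero => intro ts res i hk hlt hno; omega
  | succ k ih =>
    intro ts res i hk hlt hno
    rw [pvForA, dif_pos hlt]
    have hi := hno i le_rfl hlt
    simp only [PySem.List.pyGetD_natCast]
    rw [if_neg (by omega)]
    by_cases hlast : i = ts.length - 1
    · rw [if_pos hlast]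
      simp [PySem.List.pyGetD_zero]
    · rw [if_neg hlast]
      exact ih ts res (i + 1) (by omega) (by omega) (fun j h1 h2 => hno j (by omega) h2)

-- On a nonempty key-sorted list the head has the minimal key, so one whole pass of A's while-loop
-- acts exactly on the head: it removes it and updates res to max(m, a + res).
theorem pvForA_head (t : List Int) (ts : List (List Int)) (res : Int)
    (hsorted : (t :: ts).Pairwise (fun x y => pvKeyA x ≤ pvKeyA y)) :
    pvForA (t :: ts) res 0 =
      (ts, max (PySem.List.pyGetD t 1 0) (PySem.List.pyGetD t 0 0 + res)) := by
  by_cases hm : PySem.List.pyGetD t 1 0 ≤ res + PySem.List.pyGetD t 0 0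
  · rw [pvForA, dif_pos (by simp)]
    simp only [Int.natCast_zero, PySem.List.pyGetD_zero_cons]
    rw [if_pos hm]
    simp only [List.eraseIdx_zero, List.tail_cons]
    congr 1
    omega
  · rw [pvForA_nomatch ((t :: ts).length - 0) (t :: ts) res 0 rfl (by simp)]
    · simp only [List.eraseIdx_zero, List.tail_cons, List.getD_cons_zero]
      congr 1
      omega
    · intro j h1 h2
      match j with
      | 0 => simpa using (by omega : res + PySem.List.pyGetD t 0 0 < PySem.List.pyGetD t 1 0)
      | j + 1 =>
        have hj : j < ts.length := by simp at h2; omega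
        have hkey : pvKeyA t ≤ pvKeyA ts[j] := by
          rw [List.pairwise_cons] at hsorted
          exact hsorted.1 _ (List.getElem_mem hj)
        have hg : (t :: ts).getD (j+1) [] = ts[j] := by
          rw [List.getD_cons_succ, List.getD_eq_getElem _ _ hj]
        rw [hg]
        unfold pvKeyA at hkey
        omega

-- A's fueled while-loop on a key-sorted list is B's foldl.
theorem pvLoopA_eq_foldl (ts : List (List Int)) :
    ∀ res : Int, ts.Pairwise (fun x y => pvKeyA x ≤ pvKeyA y) →
    pvLoopA ts.length ts res =
      ts.foldl (fun req t => max (PySem.List.pyGetD t 1 0) (PySem.List.pyGetD t 0 0 + req)) res := by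
  induction ts with
  | nil => intro res _; rfl
  | cons t ts ih =>
    intro res hsorted
    rw [List.length_cons, pvLoopA]
    simp only [List.isEmpty_cons, if_false, Bool.false_eq_true]
    rw [pvForA_head t ts res hsorted]
    exact ih _ (List.Pairwise.of_cons hsorted)

-- ===== VERDICT (by name: the statement is the Claim_ definition above) =====
theorem minimumEffortII_spec : Claim_equal_minimumEffortII := by
  intro tasks _ _
  unfold Spec_minimumEffortII minimumEffortII minimumEffortII_alt
  exact pvLoopA_eq_foldl _ 0 (PySem.List.sorted_pairwise tasks pvKeyA)
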